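-- pv_equiv track=rewrite | github.com/shivampateldev/AIresumeanalyzer | modules/vector_builder.py | build_vector
-- ===== SOURCE A (Python) =====
-- def build_vector(skills: list, skill_universe: list) -> list:
--     """
--     Given a universe of skills and a specific subset, return a one-hot encoded vector.
--     """
--     skills_set = set([s.lower() for s in skills])
--     universe_lower = [s.lower() for s in skill_universe]
--
--     vector = []
--     for s in universe_lower:
--         if s in skills_set:
--             vector.append(1)
--         else:
--             vector.append(0)
--
--     return vector
-- ===== SOURCE B (Python) =====
-- def build_vector(skills: list, skill_universe: list) -> list:
--     """
--     Given a universe of skills and a specific subset, return a one-hot encoded vector.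
--     """
--     index = {}
--     for i, s in enumerate(skill_universe):
--         index.setdefault(s.lower(), []).append(i)
--
--     vector = [0] * len(skill_universe)
--     for s in {s.lower() for s in skills}:
--         for i in index.get(s, []):
--             vector[i] = 1
--
--     return vector
-- ===== Notes on version B (the rewrite author's own statement) =====
-- stated objective: alternative
-- what changed: B builds an inverted index from each lowercased universe skill to all its positions, allocates a zero vector, and marks 1s by iterating over the input skills, instead of iterating over the universe and testing membership in a set of the skills.
import Mathlib
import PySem

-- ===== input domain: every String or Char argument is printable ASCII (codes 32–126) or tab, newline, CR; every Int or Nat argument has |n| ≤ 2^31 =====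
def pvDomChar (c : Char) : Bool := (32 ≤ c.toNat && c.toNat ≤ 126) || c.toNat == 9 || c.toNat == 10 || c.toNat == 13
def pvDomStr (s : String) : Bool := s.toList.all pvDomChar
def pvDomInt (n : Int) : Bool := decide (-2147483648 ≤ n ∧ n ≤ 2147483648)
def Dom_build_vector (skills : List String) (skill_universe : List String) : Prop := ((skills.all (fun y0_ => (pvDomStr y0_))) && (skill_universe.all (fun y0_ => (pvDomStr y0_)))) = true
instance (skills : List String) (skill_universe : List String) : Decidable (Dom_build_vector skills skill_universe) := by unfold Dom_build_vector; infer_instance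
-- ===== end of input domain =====

-- B replaces A's universe-scan-with-membership-test by an inverted index from each
-- lowercased universe skill to its positions, marking 1s into a zero vector per input skill
-- (objective: alternative decomposition, same asymptotic cost).

-- ===== PORT A =====
def build_vector (skills : List String) (skill_universe : List String) : List Int :=
  let skills_set : PySem.Set String := PySem.Set.ofList (skills.map PySem.Str.lower)
  let universe_lower := skill_universe.map PySem.Str.lower
  universe_lower.foldl
    (fun vector s => vector ++ [if PySem.Set.contains skills_set s then (1 : Int) else 0]) []

-- ===== PORT B =====
-- index.setdefault(s.lower(), []).append(i)  =  d[k] = d.get(k, []) ++ [i]  =  Dict.modify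
def pvIndex (skill_universe : List String) : PySem.Dict String (List Int) :=
  (PySem.List.enumerate skill_universe).foldl
    (fun d p => d.modify (PySem.Str.lower p.2) [] (fun l => l ++ [p.1])) PySem.Dict.empty

-- the set comprehension {s.lower() for s in skills}; the final vector does not depend on
-- Python's iteration order over it (marking 1s is idempotent and commutative)
def build_vector_alt (skills : List String) (skill_universe : List String) : List Int :=
  let index := pvIndex skill_universe
  let vector0 := PySem.List.pyRepeat [(0 : Int)] (skill_universe.length : Int)
  (PySem.Set.ofList (skills.map PySem.Str.lower)).foldl
    (fun vector s =>
      (index.getD s []).foldl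
        (fun v i => PySem.List.pySetD v i 1) vector)
    vector0

-- ===== PRECONDITION & SPEC =====
def Spec_build_vector (skills : List String) (skill_universe : List String) (out : List Int) : Prop := out = build_vector_alt skills skill_universe
instance (skills : List String) (skill_universe : List String) (out : List Int) : Decidable (Spec_build_vector skills skill_universe out) := by unfold Spec_build_vector; infer_instance

-- ===== CLAIM (what is proved, stated in full; the proofs are below) =====
def Claim_equal_build_vector : Prop := ∀ (skills : List String) (skill_universe : List String), Dom_build_vector skills skill_universe → Spec_build_vector skills skill_universe (build_vector skills skill_universe)

-- ===== LEMMAS AND PROOFS =====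

-- Abbreviation (proofs only) for B's outer loop over the input skills.
def pvLoop (u : List String) (sk : List String) (v : List Int) : List Int :=
  sk.foldl
    (fun vector s =>
      ((pvIndex u).getD s []).foldl
        (fun v i => PySem.List.pySetD v i 1) vector) v

-- A's loop appends one entry per universe element: it is a map.
theorem pv_foldl_append_map {α : Type} (f : α → Int) :
    ∀ (l : List α) (acc : List Int),
      l.foldl (fun v s => v ++ [f s]) acc = acc ++ l.map f := by
  intro l
  induction l with
  | nil => intro acc; simp
  | cons x xs ih => intro acc; simp [List.foldl_cons, ih]

-- The inverted index: positions of each lowercased universe entry, in order.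
theorem pv_index_getD (u : List String) (key : String) :
    (pvIndex u).getD key [] =
      ((PySem.List.enumerate u).filter (fun p => PySem.Str.lower p.2 == key)).map (·.1) := by
  unfold pvIndex
  have h : (PySem.List.enumerate u).foldl
      (fun d p => d.modify (PySem.Str.lower p.2) [] (fun l => l ++ [p.1])) PySem.Dict.empty
      = ((PySem.List.enumerate u).map (fun p => (PySem.Str.lower p.2, p.1))).foldl
          (fun d q => d.modify q.1 [] (fun l => l ++ [q.2])) PySem.Dict.empty := by
    rw [List.foldl_map]
  rw [h, PySem.Dict.getD_foldl_modify_append, PySem.Dict.getD_empty]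
  simp [List.filter_map, Function.comp_def]

-- Membership of a natural index in the index list of `key`.
theorem pv_mem_index (u : List String) (key : String) (j : Nat) :
    ((j : Int) ∈ (pvIndex u).getD key []) ↔
      ∃ h : j < u.length, PySem.Str.lower u[j] = key := by
  rw [pv_index_getD]
  simp only [List.mem_map, List.mem_filter, PySem.List.mem_enumerate_iff]
  constructor
  · rintro ⟨p, ⟨⟨k, hk, rfl⟩, hkey⟩, hj⟩
    simp only [zero_add] at hj hkey
    have : j = k := by exact_mod_cast hj.symm
    subst this
    exact ⟨hk, by simpa using hkey⟩
  · rintro ⟨hj, hkey⟩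
    exact ⟨((j : Int), u[j]), ⟨⟨j, hj, by simp⟩, by simpa using hkey⟩, rfl⟩

-- Every element of an index list is a natural index below the universe length.
theorem pv_index_shape (u : List String) (key : String) :
    ∀ i ∈ (pvIndex u).getD key [], ∃ k : Nat, i = (k : Int) ∧ k < u.length := by
  rw [pv_index_getD]
  rintro i hi
  simp only [List.mem_map, List.mem_filter, PySem.List.mem_enumerate_iff] at hi
  rcases hi with ⟨p, ⟨⟨k, hk, rfl⟩, -⟩, hj⟩
  exact ⟨k, by simpa using hj.symm, hk⟩

-- Marking: setting 1 at a list of in-range natural positions.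
theorem pv_mark_length :
    ∀ (idxs : List Int) (v : List Int),
      (idxs.foldl (fun v i => PySem.List.pySetD v i 1) v).length = v.length := by
  intro idxs
  induction idxs with
  | nil => intro v; rfl
  | cons i rest ih => intro v; simp [List.foldl_cons, ih, PySem.List.length_pySetD]

theorem pv_mark_getElem? :
    ∀ (idxs : List Int) (v : List Int),
      (∀ i ∈ idxs, ∃ k : Nat, i = (k : Int) ∧ k < v.length) →
      ∀ j : Nat,
        (idxs.foldl (fun v i => PySem.List.pySetD v i 1) v)[j]? =
          if (j : Int) ∈ idxs then some 1 else v[j]? := by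
  intro idxs
  induction idxs with
  | nil => intro v _ j; simp
  | cons i rest ih =>
    intro v h j
    obtain ⟨k, rfl, hk⟩ := h i (List.mem_cons_self ..)
    simp only [List.foldl_cons, PySem.List.pySetD_natCast]
    rw [ih (v.set k 1) (by
      intro i hi
      obtain ⟨k', hk', hlt⟩ := h i (List.mem_cons_of_mem _ hi)
      exact ⟨k', hk', by simpa using hlt⟩) j]
    by_cases hr : (j : Int) ∈ rest
    · simp [hr]
    · by_cases hjk : j = k
      · subst hjk
        simp [hr, hk]
      · have hcast : ((j : Int) = (k : Int)) ↔ j = k := by exact_mod_cast Iff.rfl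
        simp [hr, hjk, Ne.symm hjk, hcast]

-- The loop invariant: after processing `sk`, position j holds 1 iff the lowered
-- universe entry at j is among the already-seen lowered skills.
theorem pv_loop_spec (u : List String) :
    ∀ (sk : List String) (v : List Int) (acc : List String),
      v.length = u.length →
      (∀ (j : Nat) (hj : j < u.length),
        v[j]? = some (if PySem.Str.lower u[j] ∈ acc then 1 else 0)) →
      (pvLoop u sk v).length = u.length ∧
      ∀ (j : Nat) (hj : j < u.length),
        (pvLoop u sk v)[j]? =
          some (if PySem.Str.lower u[j] ∈ acc ++ sk then 1 else 0) := by
  intro sk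
  induction sk with
  | nil =>
    intro v acc hlen hv
    exact ⟨hlen, by simpa [pvLoop] using hv⟩
  | cons s rest ih =>
    intro v acc hlen hv
    have hshape : ∀ i ∈ (pvIndex u).getD s [],
        ∃ k : Nat, i = (k : Int) ∧ k < v.length := by
      intro i hi
      obtain ⟨k, rfl, hk⟩ := pv_index_shape u _ i hi
      exact ⟨k, rfl, by omega⟩
    have hlen' : (((pvIndex u).getD s []).foldl
        (fun v i => PySem.List.pySetD v i 1) v).length = u.length := by
      rw [pv_mark_length]; exact hlen
    have hv' : ∀ (j : Nat) (hj : j < u.length),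
        (((pvIndex u).getD s []).foldl
          (fun v i => PySem.List.pySetD v i 1) v)[j]? =
        some (if PySem.Str.lower u[j] ∈ acc ++ [s] then 1 else 0) := by
      intro j hj
      rw [pv_mark_getElem? _ v hshape j, hv j hj]
      by_cases hm : (j : Int) ∈ (pvIndex u).getD s []
      · obtain ⟨hjlt, hkey⟩ := (pv_mem_index u s j).1 hm
        simp [hm, hkey]
      · have hne : ¬ PySem.Str.lower u[j] = s := by
          intro hkey
          exact hm ((pv_mem_index u s j).2 ⟨hj, hkey⟩)
        simp [hm, hne]
    have hstep := ih _ (acc ++ [s]) hlen' hv'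
    simpa [pvLoop, List.foldl_cons, List.append_assoc] using hstep

theorem pv_main (skills : List String) (skill_universe : List String) :
    build_vector skills skill_universe = build_vector_alt skills skill_universe := by
  unfold build_vector build_vector_alt
  simp only []
  rw [pv_foldl_append_map]
  have hrep : PySem.List.pyRepeat [(0 : Int)] (skill_universe.length : Int)
      = List.replicate skill_universe.length (0 : Int) := by
    rw [PySem.List.pyRepeat_singleton]; simp
  have hinit : ∀ (j : Nat) (hj : j < skill_universe.length),
      (PySem.List.pyRepeat [(0 : Int)] (skill_universe.length : Int))[j]? =
        some (if PySem.Str.lower skill_universe[j] ∈ ([] : List String) then 1 else 0) := by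
    intro j hj
    rw [hrep]
    simp [hj]
  have hlen0 : (PySem.List.pyRepeat [(0 : Int)] (skill_universe.length : Int)).length
      = skill_universe.length := by rw [hrep]; simp
  obtain ⟨hlen, hval⟩ := pv_loop_spec skill_universe
    (PySem.Set.ofList (skills.map PySem.Str.lower)) _ [] hlen0 hinit
  simp only [List.nil_append] at hval
  show _ = pvLoop skill_universe (PySem.Set.ofList (skills.map PySem.Str.lower)) _
  apply List.ext_getElem?
  intro j
  by_cases hj : j < skill_universe.length
  · rw [hval j hj]
    by_cases hx : PySem.Str.lower skill_universe[j] ∈ skills.map PySem.Str.lower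
    · simp only [List.mem_map] at hx
      simp [List.getElem?_map, List.getElem?_eq_getElem hj, PySem.Set.mem_ofList, hx]
    · simp only [List.mem_map, not_exists, not_and] at hx
      simp [List.getElem?_map, List.getElem?_eq_getElem hj, PySem.Set.mem_ofList]
  · have hlenA : (([] : List Int) ++ (skill_universe.map PySem.Str.lower).map
        (fun s => if PySem.Set.contains (PySem.Set.ofList (skills.map PySem.Str.lower)) s then (1:Int) else 0)).length ≤ j := by
      simp; omega
    rw [List.getElem?_eq_none hlenA, List.getElem?_eq_none (by omega : (pvLoop skill_universe (PySem.Set.ofList (skills.map PySem.Str.lower)) _).length ≤ j)]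

-- ===== VERDICT (by name: the statement is the Claim_ definition above) =====
theorem build_vector_spec : Claim_equal_build_vector := by
  intro skills skill_universe _
  unfold Spec_build_vector
  exact pv_main skills skill_universe
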